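-- pv_equiv track=rewrite | github.com/changpil/pyPractice | Recursion/HowManyBinarySearchTreesWithnNodes(hard).py | helper
-- ===== SOURCE A (Python) =====
-- def helper(arr, i, j):
--     if i >= j:
--         return 0
--     total = 0
--     for mid in range(i , j +1):
--         l = helper (arr,i, mid -1 )
--         r = helper(arr, mid +1, j)
--         total += l + r + 1
--     return total
-- ===== SOURCE B (Python) =====
-- def helper(arr, i, j):
--     # The result depends only on n = j - i: with g(m) the value for a range of
--     # length m, g(m) = (m+1) + 2*(g(1)+...+g(m-1)), so one loop with a running
--     # prefix sum computes it instead of recursing over all subranges.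
--     if i >= j:
--         return 0
--     g = s = 0
--     for m in range(1, j - i + 1):
--         g = (m + 1) + 2 * s
--         s += g
--     return g
-- ===== Notes on version B (the rewrite author's own statement) =====
-- stated objective: alternative
-- what changed: Replaces the recursion over (i,mid-1)/(mid+1,j) subranges with a single loop computing g(m) = (m+1) + 2*prefix_sum(g(1..m-1)), since the result depends only on j-i.
import Mathlib
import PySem

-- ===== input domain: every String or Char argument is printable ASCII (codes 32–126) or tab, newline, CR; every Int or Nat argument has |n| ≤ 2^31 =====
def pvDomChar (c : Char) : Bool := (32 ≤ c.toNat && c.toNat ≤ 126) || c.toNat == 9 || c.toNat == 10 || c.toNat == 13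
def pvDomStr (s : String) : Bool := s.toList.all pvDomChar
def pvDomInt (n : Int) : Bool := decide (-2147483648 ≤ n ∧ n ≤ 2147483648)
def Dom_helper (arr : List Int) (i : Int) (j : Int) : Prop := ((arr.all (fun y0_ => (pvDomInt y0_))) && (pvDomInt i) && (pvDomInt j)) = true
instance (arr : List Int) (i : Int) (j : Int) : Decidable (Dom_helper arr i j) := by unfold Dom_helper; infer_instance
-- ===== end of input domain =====

-- B computes the result with a single loop over m = 1..j-i maintaining a running prefix
-- sum (the value depends only on j - i), instead of A's recursion over all subranges;
-- objective: alternative.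

-- ===== PORT A =====
-- literal transliteration of A; `.attach` only supplies the membership fact for termination
def helper (arr : List Int) (i : Int) (j : Int) : Int :=
  if i ≥ j then 0
  else
    (PySem.List.pyRange i (j + 1) 1).attach.foldl
      (fun total mid =>
        let l := helper arr i (mid.1 - 1)
        let r := helper arr (mid.1 + 1) j
        total + (l + r + 1)) 0
termination_by (j - i).toNat
decreasing_by
  all_goals
    have hm := PySem.List.mem_pyRange_one.mp mid.2
    omega

-- ===== PORT B =====
def helper_alt (arr : List Int) (i : Int) (j : Int) : Int :=
  if i ≥ j then 0
  else
    ((PySem.List.pyRange 1 ((j - i) + 1) 1).foldl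
      (fun (gs : Int × Int) m => let g := (m + 1) + 2 * gs.2; (g, gs.2 + g))
      (0, 0)).1

-- ===== PRECONDITION & SPEC =====
-- Pre_ excludes inputs with j - i > 9900, on which Python A raises RecursionError
-- (its recursion depth grows linearly with j - i and exceeds the interpreter's
-- recursion limit); the threshold sits just below the interpreter-dependent
-- overflow point, and A's exponential call count means it completes on none of
-- the excluded inputs either.
def Pre_helper (arr : List Int) (i : Int) (j : Int) : Prop := j - i ≤ 9900
instance (arr : List Int) (i : Int) (j : Int) : Decidable (Pre_helper arr i j) := by unfold Pre_helper; infer_instance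
def pvWitness_helper : List Int × Int × Int := ([], 0, 3)

def Spec_helper (arr : List Int) (i : Int) (j : Int) (out : Int) : Prop := out = helper_alt arr i j
instance (arr : List Int) (i : Int) (j : Int) (out : Int) : Decidable (Spec_helper arr i j out) := by unfold Spec_helper; infer_instance

-- ===== CLAIM (what is proved, stated in full; the proofs are below) =====
def Claim_equal_helper : Prop := ∀ (arr : List Int) (i : Int) (j : Int), Dom_helper arr i j → Pre_helper arr i j → Spec_helper arr i j (helper arr i j)

-- ===== LEMMAS AND PROOFS =====

-- closed recurrence: (gS n).1 = value for a range of length n, (gS n).2 = sum of (gS t).1 for t ≤ n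
def gS : Nat → Int × Int
  | 0 => (0, 0)
  | n + 1 => let p := gS n; let g := ((n : Int) + 2) + 2 * p.2; (g, p.2 + g)

theorem gS_snd (m : Nat) : (gS m).2 = (gS (m - 1)).2 + (gS m).1 := by
  cases m with
  | zero => simp [gS]
  | succ n => simp [gS]

theorem gS_rec (n : Nat) (hn : 1 ≤ n) :
    (gS n).1 = ((n : Int) + 1) + 2 * (gS (n - 1)).2 := by
  cases n with
  | zero => omega
  | succ p => simp [gS]; ring

-- B's loop computes gS
theorem foldlB_eq_gS (n : Nat) :
    (PySem.List.pyRange 1 ((n : Int) + 1) 1).foldl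
      (fun (gs : Int × Int) m => let g := (m + 1) + 2 * gs.2; (g, gs.2 + g))
      (0, 0) = gS n := by
  induction n with
  | zero => simp [PySem.List.pyRange_one_eq_nil, gS]
  | succ n ih =>
    have hsplit := PySem.List.pyRange_one_succ_right
      (show (1 : Int) ≤ (n : Int) + 1 by omega)
    push_cast
    rw [hsplit, List.foldl_append, ih]
    simp [gS]
    ring_nf

theorem helper_alt_closed (arr : List Int) (i j : Int) :
    helper_alt arr i j = (gS (j - i).toNat).1 := by
  rw [helper_alt]
  by_cases h : i ≥ j
  · have h0 : (j - i).toNat = 0 := by omega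
    simp [h, h0, gS]
  · have hn : ((j - i).toNat : Int) = j - i := by omega
    rw [if_neg h]
    have hf := foldlB_eq_gS (j - i).toNat
    rw [hn] at hf
    rw [hf]

theorem list_sum_range_eq_finset (f : Nat → Int) (n : Nat) :
    ((List.range n).map f).sum = ∑ k ∈ Finset.range n, f k := by
  induction n with
  | zero => simp
  | succ n ih =>
    rw [List.range_succ, List.map_append, List.sum_append, Finset.sum_range_succ, ih]
    simp

theorem fin_left (m : Nat) :
    ∑ k ∈ Finset.range (m + 1), (gS (k - 1)).1 = (gS (m - 1)).2 := by
  induction m with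
  | zero => simp [gS]
  | succ n ih =>
    rw [Finset.sum_range_succ, ih]
    simp only [Nat.add_sub_cancel]
    exact (gS_snd n).symm

theorem fin_right (m : Nat) :
    ∑ k ∈ Finset.range (m + 1), (gS (m - k - 1)).1 = (gS (m - 1)).2 := by
  have hre := Finset.sum_range_reflect (fun t => (gS (t - 1)).1) (m + 1)
  have hcong : ∑ k ∈ Finset.range (m + 1), (gS (m - k - 1)).1
      = ∑ k ∈ Finset.range (m + 1), (gS (m + 1 - 1 - k - 1)).1 := by
    apply Finset.sum_congr rfl
    intro k _
    have h1 : m - k - 1 = m + 1 - 1 - k - 1 := by omega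
    rw [h1]
  rw [hcong]
  calc ∑ k ∈ Finset.range (m + 1), (gS (m + 1 - 1 - k - 1)).1
      = ∑ k ∈ Finset.range (m + 1), (gS (k - 1)).1 := hre
    _ = (gS (m - 1)).2 := fin_left m

theorem helper_closed :
    ∀ (n : Nat) (arr : List Int) (i j : Int), (j - i).toNat = n →
      helper arr i j = (gS n).1 := by
  intro n
  induction n using Nat.strong_induction_on with
  | _ n IH =>
    intro arr i j hn
    rw [helper]
    by_cases h : i ≥ j
    · have h0 : n = 0 := by omega
      simp [h, h0, gS]
    · rw [if_neg h]
      have hij : i < j := by omega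
      have hji : j - i = (n : Int) := by omega
      have hstep : ∀ (acc : Int) (mid : {x // x ∈ PySem.List.pyRange i (j + 1) 1}),
          (fun (total : Int) (mid : {x // x ∈ PySem.List.pyRange i (j + 1) 1}) =>
            let l := helper arr i (mid.1 - 1)
            let r := helper arr (mid.1 + 1) j
            total + (l + r + 1)) acc mid
          = acc + ((gS (mid.1 - 1 - i).toNat).1 + (gS (j - (mid.1 + 1)).toNat).1 + 1) := by
        intro acc mid
        have hm := PySem.List.mem_pyRange_one.mp mid.2
        have hl := IH (mid.1 - 1 - i).toNat (by omega) arr i (mid.1 - 1) rfl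
        have hr := IH (j - (mid.1 + 1)).toNat (by omega) arr (mid.1 + 1) j rfl
        simp only []
        rw [hl, hr]
      rw [PySem.List.foldl_congr_mem _ _ _ _ (fun acc x _ => hstep acc x)]
      rw [@List.foldl_attach _ _ _
        (fun (acc : Int) (v : Int) =>
          acc + ((gS (v - 1 - i).toNat).1 + (gS (j - (v + 1)).toNat).1 + 1)) 0,
        PySem.List.foldl_add, PySem.List.pyRange_one]
      have hn1 : (j + 1 - i).toNat = n + 1 := by omega
      rw [hn1, List.map_map, list_sum_range_eq_finset]
      have hcong : ∀ k ∈ Finset.range (n + 1),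
          ((fun v => (gS (v - 1 - i).toNat).1 + (gS (j - (v + 1)).toNat).1 + 1) ∘
            fun k : Nat => i + (k : Int)) k
          = (gS (k - 1)).1 + (gS (n - k - 1)).1 + 1 := by
        intro k _
        simp only [Function.comp]
        have e1 : (i + (k : Int) - 1 - i).toNat = k - 1 := by omega
        have e2 : (j - (i + (k : Int) + 1)).toNat = n - k - 1 := by omega
        rw [e1, e2]
      rw [Finset.sum_congr rfl hcong, Finset.sum_add_distrib, Finset.sum_add_distrib,
        fin_left n, fin_right n, Finset.sum_const, Finset.card_range,
        nsmul_eq_mul, mul_one]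
      have hrec := gS_rec n (by omega)
      push_cast
      omega

-- ===== VERDICT (by name: the statement is the Claim_ definition above) =====
theorem helper_spec : Claim_equal_helper := by
  intro arr i j _ _
  unfold Spec_helper
  rw [helper_alt_closed, helper_closed (j - i).toNat arr i j rfl]
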